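-- pv_equiv track=rewrite | github.com/ReeSkaaa/ASD_2_sem | lab_1/tasks/task5/task_5.py | find_max_prizes
-- ===== SOURCE A (Python) =====
-- def find_max_prizes(n):
--     prizes = []
--     i = 1  # текущее кол-во конфет
--     k = 0  # количество призов
--     # Используем цикл для распределения конфет
--     while n >= i:
--         prizes.append(i)  # добавляем кол-во конфет
--         n -= i  # уменьшение кол-ва конфет
--         i += 1  # кол-во конфет для следующего места
--         k += 1
--         # если остались незадействованные конфеты
--     if n > 0:
--         prizes[-1] += n
--     return k, prizes
-- ===== SOURCE B (Python) =====
-- import math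
--
-- def find_max_prizes(n):
--     if n < 1:
--         return 0, []
--     k = (math.isqrt(8 * n + 1) - 1) // 2
--     prizes = list(range(1, k + 1))
--     leftover = n - k * (k + 1) // 2
--     if leftover > 0:
--         prizes[-1] += leftover
--     return k, prizes
-- ===== Notes on version B (the rewrite author's own statement) =====
-- stated objective: simpler
-- what changed: Replaced the candy-distribution while-loop by a closed form: the prize count k is computed directly from an integer square root as the largest k whose k-th triangular number is at most n, the prize list is a range with the leftover candies added to the last entry.
import Mathlib
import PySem

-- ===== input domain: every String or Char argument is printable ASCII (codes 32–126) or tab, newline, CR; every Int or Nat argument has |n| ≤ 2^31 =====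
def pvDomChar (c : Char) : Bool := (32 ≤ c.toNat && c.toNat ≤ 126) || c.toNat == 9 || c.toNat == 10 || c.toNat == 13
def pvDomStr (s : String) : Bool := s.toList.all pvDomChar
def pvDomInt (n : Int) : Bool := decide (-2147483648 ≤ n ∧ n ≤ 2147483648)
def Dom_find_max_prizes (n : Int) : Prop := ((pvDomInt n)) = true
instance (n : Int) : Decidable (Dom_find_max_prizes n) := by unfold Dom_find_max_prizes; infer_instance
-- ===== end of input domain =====

-- B replaces A's candy-handing loop by a closed form (k from an integer square root); objective: simpler.

-- ===== PORT A =====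
-- prizes[-1] += n : add n to the last element (list is nonempty whenever this line is reached)
def pvBumpLast (l : List Int) (n : Int) : List Int :=
  match l with
  | [] => []
  | [x] => [x + n]
  | x :: xs => x :: pvBumpLast xs n

-- the while loop: state (n, i, k, prizes); the '1 ≤ i' conjunct is a totality guard only
-- (i starts at 1 and only increases, so it is always true on reachable states)
def pvLoopA (n i k : Int) (prizes : List Int) : Int × List Int :=
  if _h : i ≤ n ∧ 1 ≤ i then
    pvLoopA (n - i) (i + 1) (k + 1) (prizes ++ [i])
  else
    (k, if n > 0 then pvBumpLast prizes n else prizes)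
termination_by n.toNat
decreasing_by omega

def find_max_prizes (n : Int) : Int × List Int :=
  pvLoopA n 1 0 []

-- ===== PORT B =====
def find_max_prizes_alt (n : Int) : Int × List Int :=
  if n < 1 then (0, [])
  else
    let k : Int := PySem.Int.floordiv ((Int.ofNat (Nat.sqrt (8 * n + 1).toNat)) - 1) 2
    let prizes : List Int := PySem.List.pyRange 1 (k + 1) 1
    let leftover : Int := n - PySem.Int.floordiv (k * (k + 1)) 2
    (k, if leftover > 0 then prizes.dropLast ++ [prizes.getLastD 0 + leftover] else prizes)

-- ===== PRECONDITION & SPEC =====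
def Spec_find_max_prizes (n : Int) (out : Int × List Int) : Prop := out = find_max_prizes_alt n
instance (n : Int) (out : Int × List Int) : Decidable (Spec_find_max_prizes n out) := by unfold Spec_find_max_prizes; infer_instance

-- ===== CLAIM (what is proved, stated in full; the proofs are below) =====
def Claim_equal_find_max_prizes : Prop := ∀ (n : Int), Dom_find_max_prizes n → Spec_find_max_prizes n (find_max_prizes n)

-- ===== LEMMAS AND PROOFS =====

-- tri j = j*(j+1)//2, the j-th triangular number
def pvTri (j : Int) : Int := PySem.Int.floordiv (j * (j + 1)) 2

theorem pvTri_double (j : Int) : 2 * pvTri j = j * (j + 1) := by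
  have he : Even (j * (j + 1)) := Int.even_mul_succ_self j
  obtain ⟨m, hm⟩ := he
  unfold pvTri
  rw [PySem.Int.floordiv_eq_ediv_of_pos (by omega)]
  omega

theorem pvTri_pred (i : Int) : pvTri i = pvTri (i - 1) + i := by
  have h1 := pvTri_double i
  have h2 := pvTri_double (i - 1)
  nlinarith

theorem pvTri_le (a b : Int) (ha : 0 ≤ a) (hab : a ≤ b) : pvTri a ≤ pvTri b := by
  have h1 := pvTri_double a
  have h2 := pvTri_double b
  nlinarith

theorem pvBumpLast_append (l : List Int) (x n : Int) :
    pvBumpLast (l ++ [x]) n = l ++ [x + n] := by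
  induction l with
  | nil => rfl
  | cons y ys ih =>
      cases ys with
      | nil => simp [pvBumpLast]
      | cons z zs => simpa [pvBumpLast] using ih

theorem pvRamp_nonempty_shape (k : Int) (hk : 1 ≤ k) :
    PySem.List.pyRange 1 (k + 1) 1 =
      (PySem.List.pyRange 1 (k + 1) 1).dropLast ++ [(PySem.List.pyRange 1 (k + 1) 1).getLastD 0] := by
  rw [PySem.List.pyRange_one_succ_right (by omega)]
  simp

-- the loop invariant: starting the loop with the first i-1 prizes already handed out
theorem pvLoopA_inv (N : Int) (K : Int) (hK : pvTri K ≤ N) (hK2 : N < pvTri (K + 1))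
    (i : Int) (hi : 1 ≤ i) (hiK : i - 1 ≤ K) :
    pvLoopA (N - pvTri (i - 1)) i (i - 1) (PySem.List.pyRange 1 i 1) =
      (K, if N - pvTri K > 0
            then pvBumpLast (PySem.List.pyRange 1 (K + 1) 1) (N - pvTri K)
            else PySem.List.pyRange 1 (K + 1) 1) := by
  have hpred := pvTri_pred i
  by_cases hstep : i ≤ N - pvTri (i - 1)
  · -- loop body runs: N ≥ pvTri i
    have hNi : pvTri i ≤ N := by omega
    have hiK' : i ≤ K := by
      by_contra hc
      have hmono : pvTri (K + 1) ≤ pvTri i := pvTri_le (K + 1) i (by omega) (by omega)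
      omega
    rw [pvLoopA]
    rw [dif_pos ⟨hstep, hi⟩]
    have h1 : N - pvTri (i - 1) - i = N - pvTri ((i + 1) - 1) := by
      rw [show i + 1 - 1 = i from by ring]; omega
    have h2 : PySem.List.pyRange 1 i 1 ++ [i] = PySem.List.pyRange 1 (i + 1) 1 := by
      rw [PySem.List.pyRange_one_succ_right (by omega)]
    have h3 : i - 1 + 1 = (i + 1) - 1 := by ring
    rw [h1, h2, h3]
    exact pvLoopA_inv N K hK hK2 (i + 1) (by omega) (by omega)
  · -- loop exits: K = i - 1
    have hNl : N < pvTri i := by omega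
    have hKi : K = i - 1 := by
      by_contra hc
      have : pvTri i ≤ pvTri K := pvTri_le i K (by omega) (by omega)
      omega
    rw [pvLoopA, dif_neg (by omega), hKi, show i - 1 + 1 = i from by ring]
termination_by (K + 1 - i).toNat
decreasing_by omega

-- k = (isqrt(8n+1)-1)//2 brackets n between consecutive triangular numbers
theorem pvFormula_brackets (n : Int) (hn : 1 ≤ n) :
    let k : Int := PySem.Int.floordiv ((Int.ofNat (Nat.sqrt (8 * n + 1).toNat)) - 1) 2
    1 ≤ k ∧ pvTri k ≤ n ∧ n < pvTri (k + 1) := by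
  intro k
  set s : Nat := Nat.sqrt (8 * n + 1).toNat with hsdef
  have hmn : (((8 * n + 1).toNat : Nat) : Int) = 8 * n + 1 := by omega
  have hs1 : s * s ≤ (8 * n + 1).toNat := by
    have h := Nat.sqrt_le' (8 * n + 1).toNat; rwa [pow_two] at h
  have hs2 : (8 * n + 1).toNat < (s + 1) * (s + 1) := by
    have h := Nat.lt_succ_sqrt' (8 * n + 1).toNat
    rwa [Nat.succ_eq_add_one, pow_two] at h
  have hs3 : 3 ≤ s := by
    have h9 : (9 : Nat) ≤ (8 * n + 1).toNat := by omega
    by_contra hc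
    interval_cases s <;> omega
  have hk2 : k = ((s : Int) - 1) / 2 := PySem.Int.floordiv_eq_ediv_of_pos (by omega)
  have hkb : 2 * k ≤ (s : Int) - 1 ∧ (s : Int) - 1 < 2 * (k + 1) := by
    constructor <;> omega
  have hk1 : 1 ≤ k := by omega
  have hcast1 : ((s : Int)) * ((s : Int)) ≤ 8 * n + 1 := by
    calc ((s : Int)) * ((s : Int)) = ((s * s : Nat) : Int) := by push_cast; ring
    _ ≤ (((8 * n + 1).toNat : Nat) : Int) := by exact_mod_cast hs1
    _ = 8 * n + 1 := hmn
  have hcast2 : 8 * n + 1 < ((s : Int) + 1) * ((s : Int) + 1) := by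
    calc 8 * n + 1 = (((8 * n + 1).toNat : Nat) : Int) := hmn.symm
    _ < (((s + 1) * (s + 1) : Nat) : Int) := by exact_mod_cast hs2
    _ = ((s : Int) + 1) * ((s : Int) + 1) := by push_cast; ring
  have hsq1 : (2 * k + 1) * (2 * k + 1) ≤ (s : Int) * (s : Int) := by nlinarith
  have hsq2 : ((s : Int) + 1) * ((s : Int) + 1) ≤ (2 * k + 3) * (2 * k + 3) := by nlinarith
  have ht1 := pvTri_double k
  have ht2 := pvTri_double (k + 1)
  refine ⟨hk1, ?_, ?_⟩ <;> nlinarith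

-- ===== VERDICT (by name: the statement is the Claim_ definition above) =====
theorem find_max_prizes_spec : Claim_equal_find_max_prizes := by
  intro n _
  show find_max_prizes n = find_max_prizes_alt n
  by_cases hn : n < 1
  · unfold find_max_prizes find_max_prizes_alt
    rw [pvLoopA, dif_neg (by omega), if_pos hn, if_neg (by omega)]
  · replace hn : 1 ≤ n := by omega
    obtain ⟨hk1, hlo, hhi⟩ := pvFormula_brackets n hn
    set k : Int := PySem.Int.floordiv ((Int.ofNat (Nat.sqrt (8 * n + 1).toNat)) - 1) 2 with hk
    have halt : find_max_prizes_alt n =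
        (k, if n - pvTri k > 0
              then (PySem.List.pyRange 1 (k + 1) 1).dropLast ++
                     [(PySem.List.pyRange 1 (k + 1) 1).getLastD 0 + (n - pvTri k)]
              else PySem.List.pyRange 1 (k + 1) 1) := by
      simp only [find_max_prizes_alt, pvTri]
      rw [if_neg (by omega)]
    have h0 : PySem.List.pyRange 1 1 1 = ([] : List Int) :=
      PySem.List.pyRange_one_eq_nil (by omega)
    have h1 : pvTri 0 = 0 := by decide
    have hmain := pvLoopA_inv n k hlo hhi 1 (by omega) (by omega)
    rw [show (1 : Int) - 1 = 0 from rfl, h0, h1, sub_zero] at hmain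
    rw [halt]
    unfold find_max_prizes
    rw [hmain]
    by_cases hl : n - pvTri k > 0
    · rw [if_pos hl, if_pos hl]
      conv_lhs => rw [pvRamp_nonempty_shape k hk1]
      rw [pvBumpLast_append]
    · rw [if_neg hl, if_neg hl]
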